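-- pv_equiv track=rewrite | github.com/AGenson/python-terminal-based-games | Jeux_Final.py | MasterMind_Lettre_Faux
-- ===== SOURCE A (Python) =====
-- def MasterMind_Lettre_Faux(Coup, Suite):
--     compte=0
--     Suite1=[]
--     i=0
--     while(i<len(Suite)):
--         Suite1.append(Suite[i])
--         i=i+1
--     i=0
--     while(i<len(Coup)):
--         continuer=True
--         j=0
--         while(j<len(Suite1) and continuer):
--             if(Coup[i]==Suite1[j]):
--                 Suite1[j]=100
--                 Suite1.remove(100)
--                 continuer=False
--             j=j+1
--         if(continuer):
--             compte=compte+1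
--         i=i+1
--     return(compte)
-- ===== SOURCE B (Python) =====
-- def MasterMind_Lettre_Faux(Coup, Suite):
--     avail = {}
--     for ch in Suite:
--         avail[ch] = avail.get(ch, 0) + 1
--     compte = 0
--     for ch in Coup:
--         n = avail.get(ch, 0)
--         if n > 0:
--             avail[ch] = n - 1
--         else:
--             compte += 1
--     return compte
-- ===== Notes on version B (the rewrite author's own statement) =====
-- stated objective: faster
-- what changed: Replaces A's per-letter linear scan of a shrinking copy of Suite (with the set-to-100-then-remove deletion trick) by a character-count dictionary built once from Suite and decremented per Coup letter, turning the quadratic repeated scan into a single hash-counting pass.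
import Mathlib
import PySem

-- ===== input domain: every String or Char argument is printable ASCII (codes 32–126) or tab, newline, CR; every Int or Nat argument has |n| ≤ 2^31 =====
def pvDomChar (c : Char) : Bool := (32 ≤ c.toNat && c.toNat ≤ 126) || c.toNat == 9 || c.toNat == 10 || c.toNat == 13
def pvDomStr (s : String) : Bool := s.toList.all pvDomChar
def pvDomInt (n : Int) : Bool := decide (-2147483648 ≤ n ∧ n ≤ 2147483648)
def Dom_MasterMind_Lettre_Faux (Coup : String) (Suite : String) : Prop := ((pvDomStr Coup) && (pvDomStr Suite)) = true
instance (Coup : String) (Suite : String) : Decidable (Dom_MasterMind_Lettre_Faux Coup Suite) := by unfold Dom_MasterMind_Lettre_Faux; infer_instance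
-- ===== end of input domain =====

-- B replaces A's quadratic scan-and-remove over a copy of Suite by a character-count
-- dictionary built once from Suite (objective: faster, one pass per string).

-- ===== PORT A =====
-- inner 'while(j<len(Suite1) and continuer)' loop: find the first j with Coup[i]==Suite1[j],
-- set it to 100 and remove(100) — i.e. delete exactly that position (no Char equals the int
-- 100, so remove(100) removes position j); returns none when no match (continuer stays True).
def pvInnerA (c : Char) : List Char → Option (List Char)
  | [] => none
  | x :: xs => if x = c then some xs else (pvInnerA c xs).map (x :: ·)

-- outer 'while(i<len(Coup))' loop over Coup with state (Suite1, compte)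
def pvLoopA : List Char → List Char → Int → Int
  | [], _, compte => compte
  | c :: cs, s, compte =>
    match pvInnerA c s with
    | some s' => pvLoopA cs s' compte
    | none => pvLoopA cs s (compte + 1)

def MasterMind_Lettre_Faux (Coup : String) (Suite : String) : Int :=
  -- the first while loop copies Suite into the list Suite1
  pvLoopA Coup.toList Suite.toList 0

-- ===== PORT B =====
-- 'for ch in Coup' loop with state (avail, compte)
def pvLoopB : List Char → PySem.Dict Char Int → Int → Int
  | [], _, compte => compte
  | c :: cs, d, compte =>
    let n := d.getD c 0
    if n > 0 then pvLoopB cs (d.insert c (n - 1)) compte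
    else pvLoopB cs d (compte + 1)

def MasterMind_Lettre_Faux_alt (Coup : String) (Suite : String) : Int :=
  -- 'for ch in Suite: avail[ch] = avail.get(ch, 0) + 1'
  let avail := Suite.toList.foldl (fun d ch => d.insert ch (d.getD ch 0 + 1)) PySem.Dict.empty
  pvLoopB Coup.toList avail 0

-- ===== PRECONDITION & SPEC =====
def Spec_MasterMind_Lettre_Faux (Coup : String) (Suite : String) (out : Int) : Prop := out = MasterMind_Lettre_Faux_alt Coup Suite
instance (Coup : String) (Suite : String) (out : Int) : Decidable (Spec_MasterMind_Lettre_Faux Coup Suite out) := by unfold Spec_MasterMind_Lettre_Faux; infer_instance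

-- ===== CLAIM (what is proved, stated in full; the proofs are below) =====
def Claim_equal_MasterMind_Lettre_Faux : Prop := ∀ (Coup : String) (Suite : String), Dom_MasterMind_Lettre_Faux Coup Suite → Spec_MasterMind_Lettre_Faux Coup Suite (MasterMind_Lettre_Faux Coup Suite)

-- ===== LEMMAS AND PROOFS =====

lemma pvInnerA_eq_erase (c : Char) (s : List Char) :
    pvInnerA c s = if c ∈ s then some (s.erase c) else none := by
  induction s with
  | nil => rfl
  | cons x xs ih =>
    by_cases hx : x = c
    · simp [pvInnerA, hx, List.erase_cons_head]
    · have hx' : (x == c) = false := by simp [hx]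
      simp [pvInnerA, hx, ih, hx', Ne.symm hx]

-- the two loops agree whenever the dict holds the counts of the list
lemma pvLoop_eq (cs : List Char) :
    ∀ (s : List Char) (d : PySem.Dict Char Int) (compte : Int),
      (∀ x, d.getD x 0 = (s.count x : Int)) →
      pvLoopA cs s compte = pvLoopB cs d compte := by
  induction cs with
  | nil => intro s d compte _; rfl
  | cons c cs ih =>
    intro s d compte h
    by_cases hmem : c ∈ s
    · have hpos : (0 : Int) < d.getD c 0 := by
        rw [h c]; exact_mod_cast List.count_pos_iff.mpr hmem
      simp only [pvLoopA, pvLoopB, pvInnerA_eq_erase, hmem, if_pos, hpos]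
      apply ih
      intro x
      rw [PySem.Dict.getD_insert]
      by_cases hx : x = c
      · subst hx
        rw [if_pos rfl, h x, List.count_erase_self]
        have := List.count_pos_iff.mpr hmem
        omega
      · rw [if_neg hx, h x, List.count_erase_of_ne hx]
    · have h0 : d.getD c 0 = 0 := by
        rw [h c]; simp [List.count_eq_zero_of_not_mem hmem]
      simp only [pvLoopA, pvLoopB, pvInnerA_eq_erase, hmem, h0]
      simp only [lt_irrefl, if_false]
      exact ih s d (compte + 1) h

-- ===== VERDICT (by name: the statement is the Claim_ definition above) =====
theorem MasterMind_Lettre_Faux_spec : Claim_equal_MasterMind_Lettre_Faux := by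
  intro Coup Suite _
  unfold Spec_MasterMind_Lettre_Faux MasterMind_Lettre_Faux MasterMind_Lettre_Faux_alt
  apply pvLoop_eq
  intro x
  rw [PySem.Dict.getD_foldl_insert_add_one]
  simp
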